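-- pv_equiv track=rewrite | github.com/MaksMBO/labOOP | 3.py | recursion_check
-- ===== SOURCE A (Python) =====
-- def recursion_check(list_num, operation_signs, ind):
--     long = len(list_num)
--     if ind == long - 1 and not list_num[ind].isalpha():
--         return True
--     else:
--         if list_num[ind].isdecimal():
--             return recursion_check(list_num, operation_signs, ind + 1)
--         elif operation_signs.count(list_num[ind]) == 1:
--             if ind <= long - 1 and operation_signs.count(list_num[ind + 1]) == 1:
--                 return False
--             elif operation_signs.count(list_num[long - 1]) == 1:
--                 return False
--             else:
--                 return recursion_check(list_num, operation_signs, ind + 1)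
--         else:
--             return False
-- ===== SOURCE B (Python) =====
-- def recursion_check(list_num, operation_signs, ind):
--     long = len(list_num)
--     if ind == long - 1:
--         return not list_num[ind].isalpha()
--     last_is_op = operation_signs.count(list_num[long - 1]) == 1
--     for i in range(ind, long - 1):
--         tok = list_num[i]
--         if tok.isdecimal():
--             continue
--         if operation_signs.count(tok) != 1:
--             return False
--         if last_is_op or operation_signs.count(list_num[i + 1]) == 1:
--             return False
--     return not list_num[long - 1].isalpha()
-- ===== Notes on version B (the rewrite author's own statement) =====
-- stated objective: simpler
-- what changed: Replaced A's tail recursion (which re-tests the constant last token on every operator step) by a single for-loop over range(ind, len-1) with the last-token operator test hoisted out of the loop and the final not-isalpha check done once at the end.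
import Mathlib
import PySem

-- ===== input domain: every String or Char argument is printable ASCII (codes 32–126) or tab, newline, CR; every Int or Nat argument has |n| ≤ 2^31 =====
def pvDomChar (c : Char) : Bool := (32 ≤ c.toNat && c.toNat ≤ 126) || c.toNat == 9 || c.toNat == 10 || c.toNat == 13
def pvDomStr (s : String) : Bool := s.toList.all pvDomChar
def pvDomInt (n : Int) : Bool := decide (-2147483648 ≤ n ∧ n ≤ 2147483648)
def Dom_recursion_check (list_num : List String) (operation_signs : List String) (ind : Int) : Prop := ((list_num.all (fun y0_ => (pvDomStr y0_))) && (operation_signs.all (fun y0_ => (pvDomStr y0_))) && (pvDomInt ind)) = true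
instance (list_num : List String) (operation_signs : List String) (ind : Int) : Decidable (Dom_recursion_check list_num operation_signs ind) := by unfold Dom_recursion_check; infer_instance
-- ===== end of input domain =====

-- B replaces A's tail recursion by a single for-loop over range(ind, len-1) with the
-- constant last-token test hoisted out of the loop (objective: simpler).

-- needed by the port's decreasing_by
theorem pvGet_lt {α : Type} {xs : List α} {i : Int} {x : α}
    (h : PySem.List.pyGet? xs i = some x) : i < (xs.length : Int) := by
  by_contra hi
  have hn : PySem.List.pyGet? xs i = none :=
    (PySem.List.pyGet?_eq_none_iff xs i).2 (by simp [PySem.Raise.InRange]; omega)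
  simp [hn] at h

-- ===== PORT A =====
-- .isdecimal() is ported as PySem.Str.strIsdigit: on the printable-ASCII domain both
-- hold exactly on nonempty strings of '0'-'9'.
def recursion_check (list_num : List String) (operation_signs : List String) (ind : Int) : Bool :=
  let long : Int := list_num.length
  match h : PySem.List.pyGet? list_num ind with
  | none => false  -- IndexError; outside Pre_
  | some t =>
    if ind = long - 1 ∧ ¬ PySem.Str.strIsalpha t then true
    else if PySem.Str.strIsdigit t then
      recursion_check list_num operation_signs (ind + 1)
    else if PySem.List.count operation_signs t = 1 then
      -- 'ind <= long - 1 and operation_signs.count(list_num[ind+1]) == 1'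
      let c1 : Bool :=
        if ind ≤ long - 1 then
          ((PySem.List.pyGet? list_num (ind + 1)).map
            (fun t1 => decide (PySem.List.count operation_signs t1 = 1))).getD false
          -- none = IndexError on list_num[ind+1]; outside Pre_
        else false
      if c1 then false
      else if ((PySem.List.pyGet? list_num (long - 1)).map
            (fun tl => decide (PySem.List.count operation_signs tl = 1))).getD false then false
      else recursion_check list_num operation_signs (ind + 1)
    else false
  termination_by ((list_num.length : Int) - ind).toNat
  decreasing_by all_goals (have := pvGet_lt h; omega)

-- ===== PORT B =====
-- body of B's for-loop: True = this token passes (continue), False = return False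
def rcPass (l ops : List String) (lastIsOp : Bool) (i : Int) : Bool :=
  match PySem.List.pyGet? l i with
  | none => false  -- IndexError; outside Pre_
  | some tok =>
    if PySem.Str.strIsdigit tok then true
    else if PySem.List.count ops tok ≠ 1 then false
    else if lastIsOp || ((PySem.List.pyGet? l (i + 1)).map
        (fun t1 => decide (PySem.List.count ops t1 = 1))).getD false then false
    else true

def recursion_check_alt (list_num : List String) (operation_signs : List String) (ind : Int) : Bool :=
  let long : Int := list_num.length
  if ind = long - 1 then
    match PySem.List.pyGet? list_num ind with
    | none => false  -- IndexError; outside Pre_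
    | some t => ! PySem.Str.strIsalpha t
  else
    match PySem.List.pyGet? list_num (long - 1) with
    | none => false  -- IndexError on empty list; outside Pre_
    | some lastTok =>
      let lastIsOp : Bool := decide (PySem.List.count operation_signs lastTok = 1)
      ((PySem.List.pyRange ind (long - 1)).all
        (fun i => rcPass list_num operation_signs lastIsOp i))
      && ! PySem.Str.strIsalpha lastTok

-- ===== PRECONDITION & SPEC =====
-- Pre_ excludes exactly the inputs on which A raises IndexError: a start index outside
-- Python's index range (including the empty list), or a scan that reaches the last token
-- (all tokens before it decimal) while that token is an alphabetic string occurring exactly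
-- once in operation_signs, so that A indexes one past the end.
def Pre_recursion_check (list_num : List String) (operation_signs : List String) (ind : Int) : Prop :=
  list_num ≠ [] ∧ -(list_num.length : Int) ≤ ind ∧ ind < (list_num.length : Int) ∧
  ¬ (PySem.Str.strIsalpha (list_num.getLast?.getD "") = true ∧
     PySem.List.count operation_signs (list_num.getLast?.getD "") = 1 ∧
     ((PySem.List.pyRange ind ((list_num.length : Int) - 1)).all
        (fun i => ((PySem.List.pyGet? list_num i).map PySem.Str.strIsdigit).getD true)) = true)
instance (list_num : List String) (operation_signs : List String) (ind : Int) : Decidable (Pre_recursion_check list_num operation_signs ind) := by unfold Pre_recursion_check; infer_instance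

def pvWitness_recursion_check : List String × List String × Int := (["1", "+", "23"], ["+", "-"], 0)

def Spec_recursion_check (list_num : List String) (operation_signs : List String) (ind : Int) (out : Bool) : Prop := out = recursion_check_alt list_num operation_signs ind
instance (list_num : List String) (operation_signs : List String) (ind : Int) (out : Bool) : Decidable (Spec_recursion_check list_num operation_signs ind out) := by unfold Spec_recursion_check; infer_instance

-- ===== CLAIM (what is proved, stated in full; the proofs are below) =====
def Claim_equal_recursion_check : Prop := ∀ (list_num : List String) (operation_signs : List String) (ind : Int), Dom_recursion_check list_num operation_signs ind → Pre_recursion_check list_num operation_signs ind → Spec_recursion_check list_num operation_signs ind (recursion_check list_num operation_signs ind)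

-- ===== LEMMAS AND PROOFS =====

theorem char_alpha_not_digit (c : Char) (h : PySem.Chars.isalpha c = true) :
    PySem.Chars.isdigit c = false := by
  simp [PySem.Chars.isalpha, PySem.Chars.isupper, PySem.Chars.islower, Char.le_def] at h
  simp [PySem.Chars.isdigit, Char.le_def]
  simp [UInt32.le_iff_toNat_le, UInt32.lt_iff_toNat_lt] at h ⊢
  omega

theorem alpha_not_digit (s : String) (h : PySem.Str.strIsalpha s = true) :
    PySem.Str.strIsdigit s = false := by
  rw [PySem.Str.strIsalpha_eq] at h
  rw [PySem.Str.strIsdigit_eq]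
  cases hs : s.toList with
  | nil => simp [hs, PySem.Chars.strIsalpha] at h
  | cons c cs =>
    rw [hs] at h
    simp [PySem.Chars.strIsalpha] at h
    simp [PySem.Chars.strIsdigit, char_alpha_not_digit c h.1]

theorem pyGet_last {l : List String} (hne : l ≠ []) :
    PySem.List.pyGet? l ((l.length : Int) - 1) = some (l.getLast?.getD "") := by
  have h1 : 0 < l.length := List.length_pos_iff.mpr hne
  have h2 : PySem.List.pyGet? l ((l.length : Int) - 1) = l[(((l.length : Int) - 1)).toNat]? := by
    rw [PySem.List.pyGet?_of_nonneg] ; omega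
  have h3 : l.getLast?.getD "" = l[l.length - 1] := by
    rw [List.getLast?_eq_getElem?, List.getElem?_eq_getElem (by omega)] ; rfl
  have ht : (((l.length : Int) - 1)).toNat = l.length - 1 := by omega
  rw [h2, ht, List.getElem?_eq_getElem (by omega), h3]

theorem pyGet_some {l : List String} {i : Int} (h1 : -(l.length : Int) ≤ i)
    (h2 : i < (l.length : Int)) : ∃ t, PySem.List.pyGet? l i = some t := by
  cases h : PySem.List.pyGet? l i with
  | none =>
    rw [PySem.List.pyGet?_eq_none_iff] at h
    exact absurd ⟨h1, h2⟩ h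
  | some t => exact ⟨t, rfl⟩

-- one unfolding step of A's port, with the scrutinee match resolved
theorem recursion_check_eq (l ops : List String) (ind : Int) (t : String)
    (ht : PySem.List.pyGet? l ind = some t) :
    recursion_check l ops ind =
      (if ind = (l.length : Int) - 1 ∧ ¬ PySem.Str.strIsalpha t then true
       else if PySem.Str.strIsdigit t then recursion_check l ops (ind + 1)
       else if PySem.List.count ops t = 1 then
         (let c1 : Bool :=
            if ind ≤ (l.length : Int) - 1 then
              ((PySem.List.pyGet? l (ind + 1)).map
                (fun t1 => decide (PySem.List.count ops t1 = 1))).getD false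
            else false
          if c1 then false
          else if ((PySem.List.pyGet? l ((l.length : Int) - 1)).map
                (fun tl => decide (PySem.List.count ops tl = 1))).getD false then false
          else recursion_check l ops (ind + 1))
       else false) := by
  rw [recursion_check]
  split
  · rename_i heq; rw [ht] at heq; exact absurd heq (by simp)
  · rename_i t' heq; rw [ht] at heq; injection heq with hh; subst hh; rfl

-- B's loop peels one step: for ind < long-1, B(ind) = pass(ind) && B(ind+1)
theorem alt_step (l ops : List String) (ind : Int) (lastTok : String)
    (hlast : PySem.List.pyGet? l ((l.length : Int) - 1) = some lastTok)
    (hlt : ind < (l.length : Int) - 1) :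
    recursion_check_alt l ops ind =
      (rcPass l ops (decide (PySem.List.count ops lastTok = 1)) ind
       && recursion_check_alt l ops (ind + 1)) := by
  have hne : ¬ (ind = (l.length : Int) - 1) := by omega
  rw [recursion_check_alt]
  simp only [if_neg hne, hlast]
  rw [PySem.List.pyRange_one_cons (by omega : ind < (l.length : Int) - 1)]
  by_cases hend : ind + 1 = (l.length : Int) - 1
  · rw [recursion_check_alt]
    simp only [hend, hlast]
    rw [PySem.List.pyRange_one_eq_nil (by omega)]
    simp
  · rw [recursion_check_alt]
    simp only [if_neg hend, hlast]
    simp [Bool.and_assoc]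

theorem main_lemma (l ops : List String) : ∀ (n : Nat) (ind : Int),
    l ≠ [] → -(l.length : Int) ≤ ind → ind < (l.length : Int) →
    ¬ (PySem.Str.strIsalpha (l.getLast?.getD "") = true ∧
       PySem.List.count ops (l.getLast?.getD "") = 1 ∧
       ((PySem.List.pyRange ind ((l.length : Int) - 1)).all
          (fun i => ((PySem.List.pyGet? l i).map PySem.Str.strIsdigit).getD true)) = true) →
    ((l.length : Int) - 1 - ind).toNat = n →
    recursion_check l ops ind = recursion_check_alt l ops ind := by
  intro n
  induction n with
  | zero =>
    intro ind hne hlo hhi hpre hn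
    have hind : ind = (l.length : Int) - 1 := by omega
    have hget : PySem.List.pyGet? l ind = some (l.getLast?.getD "") := hind ▸ pyGet_last hne
    rw [recursion_check_eq l ops ind _ hget, recursion_check_alt]
    simp only [if_pos hind, hget]
    by_cases ha : PySem.Str.strIsalpha (l.getLast?.getD "") = true
    · have ha' : PySem.Chars.strIsalpha (l.getLast?.getD "").toList = true := by
        rw [← PySem.Str.strIsalpha_eq]; exact ha
      have hd' : PySem.Chars.strIsdigit (l.getLast?.getD "").toList = false := by
        rw [← PySem.Str.strIsdigit_eq]; exact alpha_not_digit _ ha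
      have hc' : ¬ (List.count (l.getLast?.getD "") ops = 1) :=
        fun hc => hpre ⟨ha, by simpa [PySem.List.count] using hc,
          by rw [hind, PySem.List.pyRange_one_eq_nil (by omega)]; rfl⟩
      simp [ha', hd', hc', hind]
    · have ha' : PySem.Chars.strIsalpha (l.getLast?.getD "").toList = false := by
        rw [← PySem.Str.strIsalpha_eq]; simpa using ha
      simp [ha', hind]
  | succ n ih =>
    intro ind hne hlo hhi hpre hn
    have hind : ind < (l.length : Int) - 1 := by omega
    obtain ⟨t, ht⟩ := pyGet_some hlo hhi
    obtain ⟨t1, ht1⟩ := pyGet_some (l := l) (i := ind + 1) (by omega) (by omega)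
    have hlast := pyGet_last hne
    rw [alt_step l ops ind _ hlast hind]
    rw [recursion_check_eq l ops ind t ht, rcPass]
    simp only [ht]
    have hne1 : ¬ (ind = (l.length : Int) - 1) := by omega
    have hle : ind ≤ (l.length : Int) - 1 := by omega
    rw [if_neg (by simp [hne1] : ¬ (ind = (l.length : Int) - 1 ∧ ¬ PySem.Str.strIsalpha t = true))]
    by_cases hd : PySem.Str.strIsdigit t = true
    · have hd' : PySem.Chars.strIsdigit t.toList = true := by
        rw [← PySem.Str.strIsdigit_eq]; exact hd
      have hih := ih (ind + 1) hne (by omega) (by omega)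
        (fun hp => hpre ⟨hp.1, hp.2.1, by
          rw [PySem.List.pyRange_one_cons (by omega : ind < (l.length : Int) - 1)]
          simp [ht, hd', hp.2.2]⟩) (by omega)
      simp [hd', hih]
    · have hd' : PySem.Chars.strIsdigit t.toList = false := by
        rw [← PySem.Str.strIsdigit_eq]; simpa using hd
      by_cases hc : PySem.List.count ops t = 1
      · have hc' : List.count t ops = 1 := by simpa [PySem.List.count] using hc
        simp only [if_pos hle, ht1, hlast, Option.map_some, Option.getD_some]
        by_cases hc1 : PySem.List.count ops t1 = 1
        · have hc1' : List.count t1 ops = 1 := by simpa [PySem.List.count] using hc1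
          simp [hd', hc', hc1']
        · have hc1' : ¬ (List.count t1 ops = 1) := by simpa [PySem.List.count] using hc1
          by_cases hcl : PySem.List.count ops (l.getLast?.getD "") = 1
          · have hcl' : List.count (l.getLast?.getD "") ops = 1 := by simpa [PySem.List.count] using hcl
            simp [hd', hc', hc1', hcl']
          · have hcl' : ¬ (List.count (l.getLast?.getD "") ops = 1) := by simpa [PySem.List.count] using hcl
            have hih := ih (ind + 1) hne (by omega) (by omega)
              (fun hp => hcl (by simpa [PySem.List.count] using hp.2.1)) (by omega)
            simp [hd', hc', hc1', hcl', hih]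
      · have hc' : ¬ (List.count t ops = 1) := by simpa [PySem.List.count] using hc
        simp [hd', hc']

-- ===== VERDICT (by name: the statement is the Claim_ definition above) =====
theorem recursion_check_spec : Claim_equal_recursion_check := by
  intro l ops ind _ hpre
  obtain ⟨hne, hlo, hhi, hpre'⟩ := hpre
  exact main_lemma l ops _ ind hne hlo hhi hpre' rfl
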